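-- pv_equiv track=rewrite | github.com/JulianVosseberg/code | snellab/interpret_feca_2_leca_duplication_trees.py | get_human_representing
-- ===== SOURCE A (Python) =====
-- def get_human_representing(seqs, human_seqs, human_represent, human_seq_info):
--     remaining_human_seqs = human_seqs[:]
--     repr_human = {}
--     for human in human_seqs:
--         if human in human_represent:
--             if human_represent[human] in seqs:
--                 if '_' in human:
--                     human_seq = human[:human.find('_')]
--                 else:
--                     human_seq = human
--                 repr_human[human] = human_seq_info[human_seq][0]
--                 remaining_human_seqs.remove(human)
--     return remaining_human_seqs, repr_human
-- ===== SOURCE B (Python) =====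
-- def get_human_representing(seqs, human_seqs, human_represent, human_seq_info):
--     # staged passes: select, then index, then filter
--     seq_set = set(seqs)
--     selected = [h for h in human_seqs
--                 if h in human_represent and human_represent[h] in seq_set]
--     repr_human = {}
--     for h in selected:
--         i = h.find('_')
--         base = h[:i] if i != -1 else h
--         repr_human[h] = human_seq_info[base][0]
--     remaining_human_seqs = [h for h in human_seqs if h not in repr_human]
--     return remaining_human_seqs, repr_human
-- ===== Notes on version B (the rewrite author's own statement) =====
-- stated objective: simpler
-- what changed: Replaces A's single fused loop that mutates a copy of human_seqs with list.remove and carries two pieces of state by three staged passes: a selection filter against set(seqs), a dict-building loop over only the selected humans, and a final filter of human_seqs by absence from the finished dict.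
import Mathlib
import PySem

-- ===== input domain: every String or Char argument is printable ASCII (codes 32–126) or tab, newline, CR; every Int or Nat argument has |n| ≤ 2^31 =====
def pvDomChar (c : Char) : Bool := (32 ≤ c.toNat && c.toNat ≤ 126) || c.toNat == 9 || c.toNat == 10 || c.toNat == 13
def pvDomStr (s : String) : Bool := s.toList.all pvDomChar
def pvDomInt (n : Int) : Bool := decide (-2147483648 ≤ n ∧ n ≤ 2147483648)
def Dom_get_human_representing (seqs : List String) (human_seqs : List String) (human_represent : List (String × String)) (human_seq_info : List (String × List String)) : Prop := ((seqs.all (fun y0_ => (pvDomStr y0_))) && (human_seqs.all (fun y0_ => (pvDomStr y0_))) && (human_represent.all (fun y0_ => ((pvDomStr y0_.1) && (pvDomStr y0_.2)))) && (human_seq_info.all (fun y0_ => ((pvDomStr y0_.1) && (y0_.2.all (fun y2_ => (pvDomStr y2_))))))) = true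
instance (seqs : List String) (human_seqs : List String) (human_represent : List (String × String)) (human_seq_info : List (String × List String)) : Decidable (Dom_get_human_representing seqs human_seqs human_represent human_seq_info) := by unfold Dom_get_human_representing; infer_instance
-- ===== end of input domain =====

-- B replaces A's fused loop (which mutates a copy of human_seqs with remove and carries two pieces of
-- state) by three staged passes: a selection filter, a dict-building loop over the selected humans only,
-- then a filter of human_seqs by absence from the finished dict; objective: simpler.


-- ===== PORT A =====
def get_human_representing (seqs : List String) (human_seqs : List String) (human_represent : List (String × String)) (human_seq_info : List (String × List String)) : List String × (List (String × String)) :=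
  let fin := human_seqs.foldl (fun st human =>
    match (PySem.Dict.mk human_represent).get? human with
    | some r =>
      if seqs.contains r then
        -- human_seq = human[:human.find('_')] if '_' in human else human
        let human_seq := if PySem.Str.isIn "_" human then PySem.Str.slice human none (some (PySem.Str.find human "_")) else human
        match (PySem.Dict.mk human_seq_info).get? human_seq with
        | some info =>
          match PySem.List.pyGet? info 0 with
          | some v => ((PySem.List.remove? st.1 human).getD st.1, st.2.insert human v)
            -- remove? is always 'some' here (human is still in st.1); getD only for totality
          | none => st   -- Python: IndexError (info empty) — excluded by Pre_
        | none => st     -- Python: KeyError — excluded by Pre_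
      else st
    | none => st) (human_seqs, (PySem.Dict.mk [] : PySem.Dict String String))
  (fin.1, fin.2.items)

-- ===== PORT B =====
-- base(h): h[:i] with i = h.find('_') if i != -1, else h
def pvBase (h : String) : String :=
  let i := PySem.Str.find h "_"
  if i ≠ -1 then PySem.Str.slice h none (some i) else h

def get_human_representing_alt (seqs : List String) (human_seqs : List String) (human_represent : List (String × String)) (human_seq_info : List (String × List String)) : List String × (List (String × String)) :=
  let seq_set : PySem.Set String := PySem.Set.ofList seqs
  let selected := human_seqs.filter (fun h =>
    ((PySem.Dict.mk human_represent).get? h).any (fun r => PySem.Set.contains seq_set r))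
  let repr_human := selected.foldl (fun d h =>
    match (PySem.Dict.mk human_seq_info).get? (pvBase h) with
    | some info =>
      match PySem.List.pyGet? info 0 with
      | some v => d.insert h v
      | none => d   -- Python: IndexError — excluded by Pre_
    | none => d     -- Python: KeyError — excluded by Pre_
    ) (PySem.Dict.mk [] : PySem.Dict String String)
  let remaining_human_seqs := human_seqs.filter (fun h => ! repr_human.contains h)
  (remaining_human_seqs, repr_human.items)

-- ===== PRECONDITION & SPEC =====
-- Pre_ excludes exactly the inputs where the Python raises: a human that is represented in seqs but whose
-- base name is missing from human_seq_info (KeyError) or maps to an empty info list (IndexError).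
def Pre_get_human_representing (seqs : List String) (human_seqs : List String) (human_represent : List (String × String)) (human_seq_info : List (String × List String)) : Prop :=
  ∀ h ∈ human_seqs,
    ((PySem.Dict.mk human_represent).get? h).any (fun r => seqs.contains r) = true →
    ((PySem.Dict.mk human_seq_info).get? (pvBase h)).any (fun info => !info.isEmpty) = true
instance (seqs : List String) (human_seqs : List String) (human_represent : List (String × String)) (human_seq_info : List (String × List String)) : Decidable (Pre_get_human_representing seqs human_seqs human_represent human_seq_info) := by unfold Pre_get_human_representing; infer_instance
def pvWitness_get_human_representing : List String × List String × (List (String × String)) × (List (String × List String)) :=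
  (["s1"], ["hum_1", "hum_2", "other"], [("hum_1", "s1"), ("hum_2", "s2")], [("hum", ["v"])])
def Spec_get_human_representing (seqs : List String) (human_seqs : List String) (human_represent : List (String × String)) (human_seq_info : List (String × List String)) (out : List String × (List (String × String))) : Prop := out = get_human_representing_alt seqs human_seqs human_represent human_seq_info
instance (seqs : List String) (human_seqs : List String) (human_represent : List (String × String)) (human_seq_info : List (String × List String)) (out : List String × (List (String × String))) : Decidable (Spec_get_human_representing seqs human_seqs human_represent human_seq_info out) := by unfold Spec_get_human_representing; infer_instance

-- ===== CLAIM =====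
def Claim_equal_get_human_representing : Prop := ∀ (seqs : List String) (human_seqs : List String) (human_represent : List (String × String)) (human_seq_info : List (String × List String)), Dom_get_human_representing seqs human_seqs human_represent human_seq_info → Pre_get_human_representing seqs human_seqs human_represent human_seq_info → Spec_get_human_representing seqs human_seqs human_represent human_seq_info (get_human_representing seqs human_seqs human_represent human_seq_info)

-- ===== LEMMAS AND PROOFS =====

-- the selection guard of both programs, and the value that ends up in the dict for h
-- (none if h is skipped — possibly by raising in Python, which Pre_ excludes)
def pvSel (seqs : List String) (human_represent : List (String × String)) (h : String) : Bool :=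
  ((PySem.Dict.mk human_represent).get? h).any (fun r => seqs.contains r)

def pvVal? (seqs : List String) (human_represent : List (String × String)) (human_seq_info : List (String × List String)) (h : String) : Option String :=
  match (PySem.Dict.mk human_represent).get? h with
  | some r =>
    if seqs.contains r then
      match (PySem.Dict.mk human_seq_info).get? (pvBase h) with
      | some info => PySem.List.pyGet? info 0
      | none => none
    else none
  | none => none

def pvStepD (seqs : List String) (human_represent : List (String × String)) (human_seq_info : List (String × List String)) (d : PySem.Dict String String) (h : String) : PySem.Dict String String :=
  match pvVal? seqs human_represent human_seq_info h with
  | some v => d.insert h v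
  | none => d

def pvStepA (seqs : List String) (human_represent : List (String × String)) (human_seq_info : List (String × List String)) (st : List String × PySem.Dict String String) (h : String) : List String × PySem.Dict String String :=
  match pvVal? seqs human_represent human_seq_info h with
  | some v => ((PySem.List.remove? st.1 h).getD st.1, st.2.insert h v)
  | none => st

theorem pv_remove_mid (acc t : List String) (h : String) (hna : h ∉ acc) :
    PySem.List.remove? (acc ++ h :: t) h = some (acc ++ t) := by
  induction acc with
  | nil => simp [PySem.List.remove?_cons_self]
  | cons a acc ih =>
    have hne : a ≠ h := by intro e; exact hna (by simp [e])
    have := ih (fun hm => hna (List.mem_cons_of_mem a hm))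
    simp [PySem.List.remove?_cons_of_ne _ hne, this]

theorem pv_loopA (seqs : List String) (human_represent : List (String × String)) (human_seq_info : List (String × List String)) :
    ∀ (l acc : List String) (d : PySem.Dict String String),
    (∀ a ∈ acc, pvVal? seqs human_represent human_seq_info a = none) →
    l.foldl (pvStepA seqs human_represent human_seq_info) (acc ++ l, d) =
      (acc ++ l.filter (fun h => (pvVal? seqs human_represent human_seq_info h).isNone),
       l.foldl (pvStepD seqs human_represent human_seq_info) d) := by
  intro l
  induction l with
  | nil => intro acc d _; simp
  | cons h t ih =>
    intro acc d hacc
    cases hv : pvVal? seqs human_represent human_seq_info h with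
    | none =>
      have e1 : pvStepA seqs human_represent human_seq_info (acc ++ h :: t, d) h = (acc ++ h :: t, d) := by
        simp [pvStepA, hv]
      have e2 : pvStepD seqs human_represent human_seq_info d h = d := by simp [pvStepD, hv]
      have hacc' : ∀ a ∈ acc ++ [h], pvVal? seqs human_represent human_seq_info a = none := by
        intro a ha
        rcases List.mem_append.1 ha with ha | ha
        · exact hacc a ha
        · simp at ha; simpa [ha] using hv
      have := ih (acc ++ [h]) d hacc'
      simp only [List.foldl_cons, e1, e2]
      simpa [hv] using this
    | some v =>
      have hnotacc : h ∉ acc := by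
        intro hm
        have := hacc h hm
        simp [this] at hv
      have e1 : pvStepA seqs human_represent human_seq_info (acc ++ h :: t, d) h =
          (acc ++ t, d.insert h v) := by
        simp [pvStepA, hv, pv_remove_mid acc t h hnotacc]
      have e2 : pvStepD seqs human_represent human_seq_info d h = d.insert h v := by
        simp [pvStepD, hv]
      have := ih acc (d.insert h v) hacc
      simp only [List.foldl_cons, e1, e2]
      simpa [hv] using this

theorem pv_contains_foldD (seqs : List String) (human_represent : List (String × String)) (human_seq_info : List (String × List String)) :
    ∀ (l : List String) (d : PySem.Dict String String) (x : String),
    ((l.foldl (pvStepD seqs human_represent human_seq_info) d).contains x) =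
      ((decide (x ∈ l) && (pvVal? seqs human_represent human_seq_info x).isSome) || d.contains x) := by
  intro l
  induction l with
  | nil => intro d x; simp
  | cons y t ih =>
    intro d x
    simp only [List.foldl_cons]
    rw [ih]
    cases hv : pvVal? seqs human_represent human_seq_info y with
    | none =>
      simp only [pvStepD, hv]
      by_cases hxy : x = y
      · subst hxy; simp [hv]
      · simp [List.mem_cons, hxy]
    | some v =>
      simp only [pvStepD, hv]
      rw [PySem.Dict.contains_eq_isSome_get?, PySem.Dict.get?_insert]
      by_cases hxy : x = y
      · subst hxy; simp [hv]
      · rw [if_neg hxy, ← PySem.Dict.contains_eq_isSome_get?]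
        simp [List.mem_cons, hxy]

theorem pv_set_contains (seqs : List String) (r : String) :
    PySem.Set.contains (PySem.Set.ofList seqs) r = seqs.contains r := by
  simp [PySem.Set.contains, List.contains_eq_mem, PySem.Set.mem_ofList]

-- A's "'_' in human" guard and B's "find(h,'_') != -1" guard choose the same base string
theorem pv_humanSeq_eq_base (h : String) :
    (if PySem.Str.isIn "_" h then PySem.Str.slice h none (some (PySem.Str.find h "_")) else h) = pvBase h := by
  unfold pvBase
  by_cases hin : PySem.Str.isIn "_" h = true
  · have hf : PySem.Str.find h "_" ≠ -1 :=
      (PySem.Str.find_ne_neg_one_iff (s := h) (sub := "_")).2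
        ((PySem.Str.isIn_iff_infix (sub := "_") (s := h)).1 hin)
    rw [if_pos hin, if_pos hf]
  · have hf : ¬ PySem.Str.find h "_" ≠ -1 := by
      intro hc
      exact hin ((PySem.Str.isIn_iff_infix (sub := "_") (s := h)).2
        ((PySem.Str.find_ne_neg_one_iff (s := h) (sub := "_")).1 hc))
    rw [if_neg hin, if_neg hf]

-- A's fold body, rewritten in terms of pvStepA
theorem pv_stepA_eq (seqs : List String) (human_represent : List (String × String)) (human_seq_info : List (String × List String)) :
    (fun (st : List String × PySem.Dict String String) human =>
      match (PySem.Dict.mk human_represent).get? human with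
      | some r =>
        if seqs.contains r then
          let human_seq := if PySem.Str.isIn "_" human then PySem.Str.slice human none (some (PySem.Str.find human "_")) else human
          match (PySem.Dict.mk human_seq_info).get? human_seq with
          | some info =>
            match PySem.List.pyGet? info 0 with
            | some v => ((PySem.List.remove? st.1 human).getD st.1, st.2.insert human v)
            | none => st
          | none => st
        else st
      | none => st) = pvStepA seqs human_represent human_seq_info := by
  funext st h
  simp only [pvStepA, pvVal?, pv_humanSeq_eq_base]
  cases (PySem.Dict.mk human_represent).get? h with
  | none => rfl
  | some r =>
    cases hr : seqs.contains r with
    | true =>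
      simp only [hr, if_true]
      cases (PySem.Dict.mk human_seq_info).get? (pvBase h) with
      | none => rfl
      | some info => cases PySem.List.pyGet? info 0 <;> rfl
    | false => simp only [hr, Bool.false_eq_true, if_false]

-- B's dict fold over the selected sublist equals the pvStepD fold over the whole list
theorem pv_foldB_eq_foldD (seqs : List String) (human_represent : List (String × String)) (human_seq_info : List (String × List String)) :
    ∀ (l : List String) (d : PySem.Dict String String),
    (l.filter (fun h => ((PySem.Dict.mk human_represent).get? h).any (fun r => seqs.contains r))).foldl
      (fun d h =>
        match (PySem.Dict.mk human_seq_info).get? (pvBase h) with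
        | some info =>
          match PySem.List.pyGet? info 0 with
          | some v => d.insert h v
          | none => d
        | none => d) d =
    l.foldl (pvStepD seqs human_represent human_seq_info) d := by
  intro l
  induction l with
  | nil => intro d; rfl
  | cons h t ih =>
    intro d
    cases hg : (PySem.Dict.mk human_represent).get? h with
    | none =>
      have hstep : pvStepD seqs human_represent human_seq_info d h = d := by
        simp [pvStepD, pvVal?, hg]
      simp only [List.filter_cons, hg, Option.any_none, Bool.false_eq_true, if_false,
        List.foldl_cons, hstep, ih]
    | some r =>
      cases hr : seqs.contains r with
      | true =>
        have hstep : pvStepD seqs human_represent human_seq_info d h =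
            (match (PySem.Dict.mk human_seq_info).get? (pvBase h) with
             | some info =>
               match PySem.List.pyGet? info 0 with
               | some v => d.insert h v
               | none => d
             | none => d) := by
          simp only [pvStepD, pvVal?, hg, hr, if_true]
          cases (PySem.Dict.mk human_seq_info).get? (pvBase h) with
          | none => rfl
          | some info => cases PySem.List.pyGet? info 0 <;> rfl
        simp only [List.filter_cons, hg, Option.any_some, hr, if_true, List.foldl_cons, hstep]
        exact ih _
      | false =>
        have hrm : r ∉ seqs := by simpa using hr
        have hstep : pvStepD seqs human_represent human_seq_info d h = d := by
          simp [pvStepD, pvVal?, hg, hrm]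
        simp only [List.filter_cons, hg, Option.any_some, hr, Bool.false_eq_true, if_false,
          List.foldl_cons, hstep, ih]

-- ===== VERDICT =====
theorem get_human_representing_spec : Claim_equal_get_human_representing := by
  intro seqs human_seqs human_represent human_seq_info _ _
  unfold Spec_get_human_representing get_human_representing get_human_representing_alt
  simp only [pv_set_contains, pv_stepA_eq, pv_foldB_eq_foldD]
  have hA := pv_loopA seqs human_represent human_seq_info human_seqs [] (PySem.Dict.mk []) (by simp)
  simp only [List.nil_append] at hA
  rw [hA]
  congr 1
  apply List.filter_congr
  intro x hx
  rw [pv_contains_foldD]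
  simp [hx]
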